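-- pv_equiv track=rewrite | github.com/xiaochuany/etudes | 2024-01/2024-01-02-1481.py | f
-- ===== SOURCE A (Python) =====
-- from collections import Counter
--
-- def f(nums,k):
--     """min distinct chars after removing k elem"""
--     if k>= len(nums): return 0
--     c = [v for v in Counter(nums).values()]
--     c.sort(reverse=True)
--     for _ in range(k):
--         c[-1]-=1
--         if c[-1]==0: c.pop()
--     return len(c)
-- ===== SOURCE B (Python) =====
-- from collections import Counter
--
-- def f(nums, k):
--     """min distinct chars after removing k elem"""
--     counts = sorted(Counter(nums).values())
--     remaining = len(counts)
--     for freq in counts: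
--         if k >= freq:
--             k -= freq
--             remaining -= 1
--         else:
--             break
--     return remaining
-- ===== Notes on version B (the rewrite author's own statement) =====
-- stated objective: simpler
-- what changed: Instead of simulating k single-element removals on a descending count list (decrement last, pop at zero), B sorts the counts ascending and removes whole smallest groups in one pass, subtracting each group's frequency from k until one no longer fits; the k>=len(nums) guard disappears because the all-removed case falls out naturally.
import Mathlib
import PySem

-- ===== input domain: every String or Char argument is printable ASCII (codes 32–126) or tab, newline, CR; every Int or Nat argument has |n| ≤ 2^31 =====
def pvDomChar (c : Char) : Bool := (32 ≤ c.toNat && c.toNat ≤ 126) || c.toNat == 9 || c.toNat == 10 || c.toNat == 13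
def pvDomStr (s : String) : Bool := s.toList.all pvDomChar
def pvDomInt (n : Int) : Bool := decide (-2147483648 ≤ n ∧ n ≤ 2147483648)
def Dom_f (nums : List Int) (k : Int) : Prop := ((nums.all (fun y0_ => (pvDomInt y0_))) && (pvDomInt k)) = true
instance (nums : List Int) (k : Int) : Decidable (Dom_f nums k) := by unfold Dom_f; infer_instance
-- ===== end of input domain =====

-- B replaces A's k single-element removals on a descending count list by one ascending pass
-- that removes whole smallest groups while their frequency still fits in k (objective: simpler).

-- ===== PORT A =====
-- shared helper: [v for v in Counter(nums).values()]
def counterValues (nums : List Int) : List Int := (PySem.Dict.counter nums).values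

-- one iteration of A's loop body: c[-1] -= 1; if c[-1] == 0: c.pop()
-- (on an empty list Python would raise IndexError; unreachable here since k < len(nums))
def aStep (c : List Int) : List Int :=
  match c.getLast? with
  | none => []
  | some last => if last - 1 = 0 then c.dropLast else c.dropLast ++ [last - 1]

def f (nums : List Int) (k : Int) : Int :=
  if k ≥ (nums.length : Int) then 0
  else
    (((PySem.List.pyRange 0 k 1).foldl (fun c _ => aStep c)
      (PySem.List.sorted (counterValues nums) (fun v => v) true)).length : Int)

-- ===== PORT B =====
-- B's loop: for freq in counts ascending, if k >= freq remove the whole group, else break;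
-- the returned value is the number of groups not removed.
def bLoop : List Int → Int → Int
  | [], _ => 0
  | fr :: rest, k => if k ≥ fr then bLoop rest (k - fr) else ((fr :: rest).length : Int)

def f_alt (nums : List Int) (k : Int) : Int :=
  bLoop (PySem.List.sorted (counterValues nums) (fun v => v) false) k

-- ===== PRECONDITION & SPEC =====
def Spec_f (nums : List Int) (k : Int) (out : Int) : Prop := out = f_alt nums k
instance (nums : List Int) (k : Int) (out : Int) : Decidable (Spec_f nums k out) := by
  unfold Spec_f; infer_instance

-- ===== CLAIM =====
def Claim_equal_f : Prop := ∀ (nums : List Int) (k : Int), Dom_f nums k → Spec_f nums k (f nums k)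

-- ===== LEMMAS AND PROOFS =====

-- the head-side mirror of aStep
def hStep : List Int → List Int
  | [] => []
  | a :: rest => if a - 1 = 0 then rest else (a - 1) :: rest

theorem aStep_reverse (c : List Int) : (aStep c).reverse = hStep c.reverse := by
  induction c using List.reverseRecOn with
  | nil => rfl
  | append_singleton xs x _ =>
      simp [aStep, hStep]
      split_ifs <;> simp

theorem foldl_const_iterate (g : List Int → List Int) (l : List Int) (c : List Int) :
    l.foldl (fun c _ => g c) c = g^[l.length] c := by
  induction l generalizing c with
  | nil => rfl
  | cons x xs ih => simpa [Function.iterate_succ_apply] using ih (g c)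

theorem iterate_aStep_reverse (n : ℕ) (c : List Int) :
    (aStep^[n] c).reverse = hStep^[n] c.reverse := by
  induction n generalizing c with
  | zero => rfl
  | succ m ih =>
      rw [Function.iterate_succ_apply, Function.iterate_succ_apply, ← aStep_reverse, ih]

theorem hStep_peel (rest : List Int) (n : ℕ) :
    ∀ a : Int, (n : Int) < a → hStep^[n] (a :: rest) = (a - n) :: rest := by
  induction n with
  | zero => intro a _; simp
  | succ m ih =>
      intro a hlt
      have ha2 : 2 ≤ a := by omega
      rw [Function.iterate_succ_apply]
      have : hStep (a :: rest) = (a - 1) :: rest := by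
        simp [hStep]; omega
      rw [this, ih (a - 1) (by omega)]
      congr 1
      push_cast; ring

theorem hStep_peel_all (rest : List Int) (a : Int) (ha : 1 ≤ a) :
    hStep^[a.toNat] (a :: rest) = rest := by
  obtain ⟨m, hm⟩ : ∃ m, a.toNat = m + 1 := ⟨a.toNat - 1, by omega⟩
  rw [hm, Function.iterate_succ_apply', hStep_peel rest m a (by omega)]
  have : a - (m : Int) = 1 := by omega
  rw [this]; simp [hStep]

theorem main_loop (asc : List Int) (hpos : ∀ v ∈ asc, 1 ≤ v) (n : ℕ) :
    ((hStep^[n] asc).length : Int) = bLoop asc (n : Int) := by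
  induction asc generalizing n with
  | nil => simp [Function.iterate_fixed (show hStep [] = [] from rfl), bLoop]
  | cons a rest ih =>
      have ha : 1 ≤ a := hpos a (by simp)
      by_cases h : (n : Int) ≥ a
      · have hn : n = (n - a.toNat) + a.toNat := by omega
        conv_lhs => rw [hn]
        rw [Function.iterate_add_apply, hStep_peel_all rest a ha]
        rw [ih (fun v hv => hpos v (by simp [hv]))]
        have hc : (((n - a.toNat : ℕ)) : Int) = (n : Int) - a := by omega
        rw [hc]
        simp only [bLoop]
        rw [if_pos h]
      · rw [hStep_peel rest n a (by omega)]
        simp only [bLoop]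
        rw [if_neg h]
        simp

theorem bLoop_neg (asc : List Int) (hpos : ∀ v ∈ asc, 1 ≤ v) (k : Int) (hk : k < 0) :
    bLoop asc k = bLoop asc 0 := by
  cases asc with
  | nil => rfl
  | cons a rest =>
      have ha : 1 ≤ a := hpos a (by simp)
      simp only [bLoop]
      rw [if_neg (by omega), if_neg (by omega)]

theorem bLoop_all (asc : List Int) (hpos : ∀ v ∈ asc, 1 ≤ v) (k : Int)
    (hk : asc.sum ≤ k) : bLoop asc k = 0 := by
  induction asc generalizing k with
  | nil => rfl
  | cons a rest ih =>
      have ha : 1 ≤ a := hpos a (by simp)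
      have hrest : (0:Int) ≤ rest.sum := by
        have : ∀ v ∈ rest, (0:Int) ≤ v := fun v hv => le_trans (by omega) (hpos v (by simp [hv]))
        exact List.sum_nonneg this
      have hsum : a + rest.sum ≤ k := by simpa using hk
      simp only [bLoop]
      rw [if_pos (by omega)]
      exact ih (fun v hv => hpos v (by simp [hv])) (k - a) (by omega)

theorem counterValues_pos (nums : List Int) : ∀ v ∈ counterValues nums, 1 ≤ v := by
  intro v hv
  rw [counterValues, show (PySem.Dict.counter nums).values
      = (PySem.Dict.counter nums).items.map (·.2) from rfl,
    PySem.Dict.items_counter] at hv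
  simp only [List.map_map, List.mem_map] at hv
  obtain ⟨x, hx, hxv⟩ := hv
  have hxn : x ∈ nums := (PySem.Set.mem_ofList nums x).mp hx
  have : 1 ≤ nums.count x := List.count_pos_iff.mpr hxn
  have hv' : v = (nums.count x : Int) := by simpa using hxv.symm
  omega

theorem sum_counterValues (nums : List Int) :
    (counterValues nums).sum = (nums.length : Int) := by
  have h1 : (PySem.Dict.counter nums).values
      = (PySem.Dict.counter nums).items.map (·.2) := rfl
  have h2 : counterValues nums
      = (PySem.Set.ofList nums).map (fun x => (nums.count x : Int)) := by
    rw [counterValues, h1, PySem.Dict.items_counter, List.map_map]; rfl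
  rw [h2]
  have hperm : (PySem.Set.ofList nums : List Int).Perm nums.dedup := by
    rw [List.perm_ext_iff_of_nodup (PySem.Set.nodup_ofList nums) nums.nodup_dedup]
    intro a
    rw [PySem.Set.mem_ofList, List.mem_dedup]
  have := (hperm.map (fun x => (nums.count x : Int))).sum_eq
  rw [this]
  have hnat : (nums.dedup.map fun x => nums.count x).sum = nums.length :=
    List.sum_map_count_dedup_eq_length nums
  have hcast : ∀ (l : List Int),
      (l.map fun x => (nums.count x : Int)).sum
        = ((l.map fun x => nums.count x).sum : Int) := by
    intro l
    induction l with
    | nil => simp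
    | cons y ys ih => simp [ih]
  rw [hcast, hnat]

theorem desc_reverse_eq_asc (nums : List Int) :
    (PySem.List.sorted (counterValues nums) (fun v => v) true).reverse
      = PySem.List.sorted (counterValues nums) (fun v => v) false := by
  apply List.Perm.eq_of_pairwise' (r := (· ≤ ·))
  · rw [List.pairwise_reverse]
    exact PySem.List.sorted_pairwise_rev (counterValues nums) (fun v => v)
  · exact PySem.List.sorted_pairwise (counterValues nums) (fun v => v)
  · exact ((List.reverse_perm _).trans
      ((PySem.List.sorted_perm _ _ _).trans (PySem.List.sorted_perm _ _ _).symm))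

-- ===== VERDICT =====
theorem f_spec : Claim_equal_f := by
  intro nums k _
  unfold Spec_f f f_alt
  set cv := counterValues nums with hcv
  have hpos := counterValues_pos nums
  have hposasc : ∀ v ∈ PySem.List.sorted cv (fun v => v) false, 1 ≤ v := by
    intro v hv
    exact hpos v ((PySem.List.mem_sorted _ _ _ _).mp hv)
  by_cases hg : k ≥ (nums.length : Int)
  · rw [if_pos hg]
    have hsum : (PySem.List.sorted cv (fun v => v) false).sum = (nums.length : Int) := by
      rw [(PySem.List.sorted_perm cv (fun v => v) false).sum_eq, hcv, sum_counterValues]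
    rw [bLoop_all _ hposasc k (by rw [hsum]; exact hg)]
  · rw [if_neg hg]
    rw [foldl_const_iterate aStep, PySem.List.length_pyRange_one]
    have hlen : ∀ n : ℕ, ((aStep^[n] (PySem.List.sorted cv (fun v => v) true)).length : Int)
        = bLoop (PySem.List.sorted cv (fun v => v) false) (n : Int) := by
      intro n
      have h := iterate_aStep_reverse n (PySem.List.sorted cv (fun v => v) true)
      have hl : (aStep^[n] (PySem.List.sorted cv (fun v => v) true)).length
          = (hStep^[n] ((PySem.List.sorted cv (fun v => v) true).reverse)).length := by
        rw [← h]; simp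
      rw [hl, desc_reverse_eq_asc, ← hcv]
      exact main_loop _ hposasc n
    rw [hlen ((k - 0).toNat)]
    by_cases hk : 0 ≤ k
    · congr 1; omega
    · have h0 : ((k - 0).toNat : Int) = 0 := by omega
      rw [h0, ← bLoop_neg _ hposasc k (by omega)]
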